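-- pv_equiv track=rewrite | github.com/Ivan-Law/Mastermind100 | mm100.py | replaceFirstAppear
-- ===== SOURCE A (Python) =====
-- def replaceFirstAppear(orglist, replaceThis, symbol):
--     newlist = []
--     first = 0
--     for x in orglist:
--         if x != replaceThis:
--             newlist.append(x)
--         else:
--             if first == 0:
--                 newlist.append(symbol)
--                 first = 1
--             else:
--                 newlist.append(x)
--     s = ''.join(newlist)
--     return s
-- ===== SOURCE B (Python) =====
-- def replaceFirstAppear(orglist, replaceThis, symbol):
--     newlist = list(orglist)
--     if replaceThis in newlist:
--         newlist[newlist.index(replaceThis)] = symbol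
--     return ''.join(newlist)
-- ===== Notes on version B (the rewrite author's own statement) =====
-- stated objective: simpler
-- what changed: Replaced A's element-by-element rebuild loop with a first-occurrence flag by a membership guard plus a single index/substitution on a copy of the list, then join.
import Mathlib
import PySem

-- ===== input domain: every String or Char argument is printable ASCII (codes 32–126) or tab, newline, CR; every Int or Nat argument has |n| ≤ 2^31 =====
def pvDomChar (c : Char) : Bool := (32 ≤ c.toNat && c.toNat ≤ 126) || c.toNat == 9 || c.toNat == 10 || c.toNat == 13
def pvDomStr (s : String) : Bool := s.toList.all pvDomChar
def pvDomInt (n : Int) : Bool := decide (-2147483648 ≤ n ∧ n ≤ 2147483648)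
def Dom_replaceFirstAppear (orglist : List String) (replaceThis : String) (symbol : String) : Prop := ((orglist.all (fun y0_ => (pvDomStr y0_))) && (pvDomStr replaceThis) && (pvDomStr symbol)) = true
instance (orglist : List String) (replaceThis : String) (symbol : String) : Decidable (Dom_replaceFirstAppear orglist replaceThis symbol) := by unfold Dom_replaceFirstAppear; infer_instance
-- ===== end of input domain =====

-- B replaces A's rebuild loop with a first-occurrence flag by a membership guard
-- plus a single index/substitution on a copy, then join (objective: simpler).

-- ===== PORT A =====
-- the loop body of A: append x, or append symbol on the first match (flag first)
def rfaStep (replaceThis symbol : String) (acc : List String × Int) (x : String) : List String × Int :=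
  if x ≠ replaceThis then (acc.1 ++ [x], acc.2)
  else if acc.2 = 0 then (acc.1 ++ [symbol], 1)
  else (acc.1 ++ [x], acc.2)

def replaceFirstAppear (orglist : List String) (replaceThis : String) (symbol : String) : String :=
  let st := orglist.foldl (rfaStep replaceThis symbol) ([], 0)
  PySem.Str.join "" st.1

-- ===== PORT B =====
def replaceFirstAppear_alt (orglist : List String) (replaceThis : String) (symbol : String) : String :=
  let newlist := orglist
  let newlist :=
    if replaceThis ∈ newlist then
      match PySem.List.index? newlist replaceThis with
      | some i => PySem.List.pySetD newlist (i : Int) symbol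
      | none => newlist    -- unreachable under the membership guard
    else newlist
  PySem.Str.join "" newlist

-- ===== PRECONDITION & SPEC =====
def Spec_replaceFirstAppear (orglist : List String) (replaceThis : String) (symbol : String) (out : String) : Prop := out = replaceFirstAppear_alt orglist replaceThis symbol
instance (orglist : List String) (replaceThis : String) (symbol : String) (out : String) : Decidable (Spec_replaceFirstAppear orglist replaceThis symbol out) := by unfold Spec_replaceFirstAppear; infer_instance

-- ===== CLAIM (what is proved, stated in full; the proofs are below) =====
def Claim_equal_replaceFirstAppear : Prop := ∀ (orglist : List String) (replaceThis : String) (symbol : String), Dom_replaceFirstAppear orglist replaceThis symbol → Spec_replaceFirstAppear orglist replaceThis symbol (replaceFirstAppear orglist replaceThis symbol)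

-- ===== LEMMAS AND PROOFS =====

-- once the flag is 1, the loop just copies the remaining elements
theorem rfa_foldl_one (r s : String) : ∀ (l acc : List String),
    List.foldl (rfaStep r s) (acc, 1) l = (acc ++ l, 1) := by
  intro l
  induction l with
  | nil => intro acc; simp
  | cons x t ih =>
    intro acc
    by_cases hx : x = r <;> simp [rfaStep, hx, ih]

-- the accumulated prefix factors out of the loop (flag 0)
theorem rfa_foldl_shift (r s : String) : ∀ (l acc : List String),
    List.foldl (rfaStep r s) (acc, 0) l =
      (acc ++ (List.foldl (rfaStep r s) ([], 0) l).1,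
       (List.foldl (rfaStep r s) ([], 0) l).2) := by
  intro l
  induction l with
  | nil => intro acc; simp
  | cons x t ih =>
    intro acc
    by_cases hx : x = r
    · subst hx
      have h1 : ∀ a : List String, rfaStep x s (a, 0) x = (a ++ [s], 1) := by
        intro a; simp [rfaStep]
      rw [List.foldl_cons, h1, List.foldl_cons, h1,
        rfa_foldl_one, rfa_foldl_one]
      simp
    · have h1 : ∀ a : List String, rfaStep r s (a, 0) x = (a ++ [x], 0) := by
        intro a; simp [rfaStep, hx]
      rw [List.foldl_cons, h1, List.foldl_cons, h1, ih, ih (([] : List String) ++ [x])]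
      simp

-- the list A's loop builds is exactly B's substituted list
theorem rfa_lists_eq (r s : String) : ∀ (l : List String),
    (List.foldl (rfaStep r s) ([], 0) l).1 =
      (if r ∈ l then
        match PySem.List.index? l r with
        | some i => PySem.List.pySetD l (i : Int) s
        | none => l
      else l) := by
  intro l
  induction l with
  | nil => simp
  | cons x t ih =>
    by_cases hx : x = r
    · subst hx
      have h1 : rfaStep x s ([], 0) x = ([s], 1) := by simp [rfaStep]
      rw [List.foldl_cons, h1, rfa_foldl_one,
        if_pos (List.mem_cons_self), PySem.List.index?_cons_self]
      simp only [List.cons_append, List.nil_append]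
      rw [PySem.List.pySetD_natCast]
      rfl
    · have h1 : rfaStep r s ([], 0) x = ([x], 0) := by
        simp [rfaStep, hx]
      rw [List.foldl_cons, h1, rfa_foldl_shift, ih]
      by_cases hm : r ∈ t
      · cases h : PySem.List.index? t r with
        | none => exact absurd ((PySem.List.index?_eq_none_iff t r).mp h) (by simpa using hm)
        | some i =>
          have h2 : PySem.List.index? (x :: t) r = some (i + 1) := by
            rw [PySem.List.index?_cons_of_ne t hx, h]; rfl
          rw [if_pos hm, if_pos (List.mem_cons_of_mem x hm), h2]
          simp only [List.cons_append, List.nil_append]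
          rw [PySem.List.pySetD_natCast, PySem.List.pySetD_natCast]
          rfl
      · have hm' : r ∉ x :: t := by
          simp only [List.mem_cons, not_or]
          exact ⟨fun hc => hx hc.symm, hm⟩
        rw [if_neg hm, if_neg hm']
        simp

-- ===== VERDICT (by name: the statement is the Claim_ definition above) =====
theorem replaceFirstAppear_spec : Claim_equal_replaceFirstAppear := by
  intro orglist r s _
  show replaceFirstAppear orglist r s = replaceFirstAppear_alt orglist r s
  unfold replaceFirstAppear replaceFirstAppear_alt
  simp only []
  exact congrArg (PySem.Str.join "") (rfa_lists_eq r s orglist)
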